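-- pv_equiv track=rewrite | github.com/DG2609/agentic_vs | agent/tools/memory.py | _sanitize_fts_query
-- ===== SOURCE A (Python) =====
-- def _sanitize_fts_query(query: str) -> str:
--     """Escape FTS5 special characters and wrap in double-quotes for phrase search.
--
--     FTS5 special chars: " * ^ ( ) AND OR NOT
--     Strategy: strip/replace special chars, wrap each token in double quotes
--     so the query becomes a safe multi-term OR search.
--     """
--     # Replace characters that break FTS5 syntax
--     sanitized = query.replace('"', ' ').replace("'", ' ')
--     # Remove other FTS5 operators
--     for op in ['(', ')', '*', '^', '+', '-']:
--         sanitized = sanitized.replace(op, ' ')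
--     # Split into tokens and quote each one
--     tokens = sanitized.split()
--     if not tokens:
--         return '""'
--     # Build: "token1" "token2" ... (implicit AND in FTS5)
--     return ' '.join(f'"{t}"' for t in tokens if t)
-- ===== SOURCE B (Python) =====
-- def _sanitize_fts_query(query: str) -> str:
--     """Single-pass tokenizer: treat whitespace and FTS5 operator chars as
--     delimiters, collect the runs in between, quote each run."""
--     delims = {'"', "'", '(', ')', '*', '^', '+', '-'}
--     tokens = []
--     buf = []
--     for ch in query:
--         if ch.isspace() or ch in delims:
--             if buf:
--                 tokens.append(''.join(buf))
--                 buf = []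
--         else:
--             buf.append(ch)
--     if buf:
--         tokens.append(''.join(buf))
--     if not tokens:
--         return '""'
--     return ' '.join('"' + t + '"' for t in tokens)
-- ===== Notes on version B (the rewrite author's own statement) =====
-- stated objective: alternative
-- what changed: A makes eight full replace passes over the string and then a split pass; B tokenizes in a single pass over the characters, treating whitespace and the operator characters as delimiters (trades C-level str.replace passes for one explicit scan).
import Mathlib
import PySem

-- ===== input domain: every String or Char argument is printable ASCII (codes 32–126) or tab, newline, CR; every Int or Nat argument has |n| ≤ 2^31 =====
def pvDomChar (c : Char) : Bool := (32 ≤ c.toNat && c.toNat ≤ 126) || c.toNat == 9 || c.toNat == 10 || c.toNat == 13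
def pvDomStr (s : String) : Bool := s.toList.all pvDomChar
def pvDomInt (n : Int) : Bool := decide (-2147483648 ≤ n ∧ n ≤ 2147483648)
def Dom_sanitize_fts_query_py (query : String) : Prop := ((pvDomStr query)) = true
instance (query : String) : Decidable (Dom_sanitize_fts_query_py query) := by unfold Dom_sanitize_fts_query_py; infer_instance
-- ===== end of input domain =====

-- Alternative decomposition: A makes eight full-string replace passes then splits;
-- B is one single-pass tokenizer (whitespace and operator chars as delimiters).


-- ===== PORT A =====
-- Ported over List Char (query.toList) with the exact PySem.Chars primitives
-- (replace / split₀ / join); String.ofList at the end rebuilds the str.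
def sanitize_fts_query_py (query : String) : String :=
  -- sanitized = query.replace('"', ' ').replace("'", ' ')
  let sanitized := PySem.Chars.replace (PySem.Chars.replace query.toList ['"'] [' ']) ['\''] [' ']
  -- for op in ['(', ')', '*', '^', '+', '-']: sanitized = sanitized.replace(op, ' ')
  let sanitized := [['('], [')'], ['*'], ['^'], ['+'], ['-']].foldl
    (fun s op => PySem.Chars.replace s op [' ']) sanitized
  -- tokens = sanitized.split()
  let tokens := PySem.Chars.split₀ sanitized
  if tokens = [] then "\"\""
  else String.ofList (PySem.Chars.join [' ']
    ((tokens.filter (fun t => !t.isEmpty)).map (fun t => '"' :: t ++ ['"'])))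

-- ===== PORT B =====
-- one step of B's loop: on a delimiter flush the buffer, otherwise extend it
def pvBStep (delims : List Char) (st : List (List Char) × List Char) (ch : Char) :
    List (List Char) × List Char :=
  if PySem.Chars.isspace ch || delims.contains ch then
    if st.2 ≠ [] then (st.1 ++ [st.2], []) else st
  else (st.1, st.2 ++ [ch])

def sanitize_fts_query_py_alt (query : String) : String :=
  let delims : List Char := ['"', '\'', '(', ')', '*', '^', '+', '-']
  let st := query.toList.foldl (pvBStep delims) ([], [])
  let tokens := if st.2 ≠ [] then st.1 ++ [st.2] else st.1
  if tokens = [] then "\"\""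
  else String.ofList (PySem.Chars.join [' '] (tokens.map (fun t => '"' :: t ++ ['"'])))

-- ===== PRECONDITION & SPEC =====
def Spec_sanitize_fts_query_py (query : String) (out : String) : Prop := out = sanitize_fts_query_py_alt query
instance (query : String) (out : String) : Decidable (Spec_sanitize_fts_query_py query out) := by unfold Spec_sanitize_fts_query_py; infer_instance

-- ===== CLAIM (what is proved, stated in full; the proofs are below) =====
def Claim_equal_sanitize_fts_query_py : Prop := ∀ (query : String), Dom_sanitize_fts_query_py query → Spec_sanitize_fts_query_py query (sanitize_fts_query_py query)

-- ===== LEMMAS AND PROOFS =====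

-- the set of operator characters B treats as delimiters
def pvDelims : List Char := ['"', '\'', '(', ')', '*', '^', '+', '-']

-- substitute every character of S by a space
def pvSubstIn (S : List Char) (c : Char) : Char := if c ∈ S then ' ' else c

-- the substitution A's replace chain performs on each character
def pvSubst (c : Char) : Char := pvSubstIn pvDelims c

-- replacing a single character by a single character is a map
theorem replace_go_single (c d : Char) :
    ∀ (l : List Char) (fuel : Nat) (acc : List Char), l.length ≤ fuel →
      PySem.Chars.replace.go [c] [d] fuel l acc
        = acc.reverse ++ l.map (fun x => if x = c then d else x) := by
  intro l
  induction l with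
  | nil => intro fuel acc _; cases fuel <;> simp [PySem.Chars.replace.go]
  | cons x t ih =>
      intro fuel acc hle
      cases fuel with
      | zero => simp at hle
      | succ n =>
          simp only [PySem.Chars.replace.go, List.isPrefixOf]
          by_cases h : c = x
          · subst h
            simp only [beq_self_eq_true, Bool.true_and, if_pos]
            rw [show List.drop (List.length [c]) (c :: t) = t by simp]
            rw [ih n (List.reverse [d] ++ acc) (by simpa using Nat.le_of_succ_le_succ hle)]
            simp
          · have hb : (c == x) = false := by simp [h]
            simp only [hb, Bool.false_and, if_neg Bool.false_ne_true]
            rw [ih n (x :: acc) (by simpa using Nat.le_of_succ_le_succ hle)]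
            simp [Ne.symm h]

theorem replace_single (c d : Char) (l : List Char) :
    PySem.Chars.replace l [c] [d] = l.map (fun x => if x = c then d else x) := by
  simp only [PySem.Chars.replace, List.isEmpty_cons, if_neg Bool.false_ne_true]
  simpa using replace_go_single c d l l.length [] le_rfl

-- one more single-character replace extends the substituted set
theorem subst_in_step (d : Char) (S : List Char) (c : Char) :
    (if pvSubstIn S c = d then ' ' else pvSubstIn S c) = pvSubstIn (d :: S) c := by
  unfold pvSubstIn
  by_cases hm : c ∈ S
  · rw [if_pos hm, if_pos (List.mem_cons_of_mem d hm)]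
    split_ifs <;> rfl
  · rw [if_neg hm]
    by_cases hcd : c = d
    · rw [if_pos hcd, if_pos (by simp [hcd])]
    · rw [if_neg hcd, if_neg (by simp [hcd, hm])]

theorem map_sub_step (d : Char) (S : List Char) (l : List Char) :
    (l.map (pvSubstIn S)).map (fun x => if x = d then ' ' else x)
      = l.map (pvSubstIn (d :: S)) := by
  induction l with
  | nil => rfl
  | cons c t ih =>
      simp only [List.map_cons]
      rw [ih]
      congr 1
      show (if pvSubstIn S c = d then ' ' else pvSubstIn S c) = pvSubstIn (d :: S) c
      exact subst_in_step d S c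

theorem map_sub_base (l : List Char) :
    l.map (fun x => if x = '"' then ' ' else x) = l.map (pvSubstIn ['"']) := by
  refine List.map_congr_left fun c _ => ?_
  unfold pvSubstIn
  simp only [List.mem_singleton]

-- the order the characters were substituted in does not matter
theorem subst_perm (c : Char) :
    pvSubstIn ['-', '+', '^', '*', ')', '(', '\'', '"'] c = pvSubst c := by
  unfold pvSubst pvSubstIn pvDelims
  have hiff : (c ∈ ['-', '+', '^', '*', ')', '(', '\'', '"'])
      ↔ (c ∈ ['"', '\'', '(', ')', '*', '^', '+', '-']) := by
    simp only [List.mem_cons, List.not_mem_nil, or_false]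
    tauto
  rw [if_congr hiff rfl rfl]

-- the eight replace passes collapse to one pvSubst map
theorem replace_chain_eq_map (l : List Char) :
    [['('], [')'], ['*'], ['^'], ['+'], ['-']].foldl
      (fun s op => PySem.Chars.replace s op [' '])
      (PySem.Chars.replace (PySem.Chars.replace l ['"'] [' ']) ['\''] [' '])
    = l.map pvSubst := by
  simp only [List.foldl_cons, List.foldl_nil, replace_single]
  rw [map_sub_base, map_sub_step '\'', map_sub_step '(', map_sub_step ')',
    map_sub_step '*', map_sub_step '^', map_sub_step '+', map_sub_step '-']
  exact List.map_congr_left fun c _ => subst_perm c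

-- pvSubst turns B's delimiter test into a whitespace test …
theorem isspace_subst (c : Char) :
    PySem.Chars.isspace (pvSubst c)
      = (PySem.Chars.isspace c || pvDelims.contains c) := by
  unfold pvSubst pvSubstIn
  by_cases hm : c ∈ pvDelims
  · rw [if_pos hm]
    have hc : pvDelims.contains c = true := by simpa using hm
    rw [hc, Bool.or_true]
    decide
  · rw [if_neg hm]
    have hc : pvDelims.contains c = false := by simpa using hm
    rw [hc, Bool.or_false]

-- … and is the identity on non-delimiters
theorem subst_of_not_delim (c : Char)
    (h : (PySem.Chars.isspace c || pvDelims.contains c) = false) :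
    pvSubst c = c := by
  have hc := (Bool.or_eq_false_iff.mp h).2
  have hm : c ∉ pvDelims := by simpa using hc
  unfold pvSubst pvSubstIn
  rw [if_neg hm]

-- finishing B's fold state
def pvFinish (st : List (List Char) × List Char) : List (List Char) :=
  if st.2 ≠ [] then st.1 ++ [st.2] else st.1

-- A's split of the substituted string IS B's fold, state for state
theorem split_go_eq_fold :
    ∀ (l cur : List Char) (acc : List (List Char)),
      PySem.Chars.split₀.go (l.map pvSubst) cur acc
        = pvFinish (l.foldl (pvBStep pvDelims) (acc.reverse, cur.reverse)) := by
  intro l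
  induction l with
  | nil =>
      intro cur acc
      simp only [List.map_nil, PySem.Chars.split₀.go, List.foldl_nil, pvFinish]
      by_cases h : cur = []
      · subst h; simp
      · have : cur.isEmpty = false := by simpa [List.isEmpty_iff] using h
        simp [this, h]
  | cons c t ih =>
      intro cur acc
      simp only [List.map_cons, PySem.Chars.split₀.go, List.foldl_cons]
      rw [isspace_subst c]
      by_cases hdl : (PySem.Chars.isspace c || pvDelims.contains c) = true
      · rw [if_pos hdl]
        by_cases hc : cur = []
        · subst hc
          rw [if_pos List.isEmpty_nil, ih [] acc]
          have hstep : pvBStep pvDelims (acc.reverse, List.reverse []) c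
              = (acc.reverse, List.reverse []) := by
            unfold pvBStep
            rw [if_pos hdl, if_neg (by simp)]
          rw [hstep]
        · have hce : ¬ cur.isEmpty = true := by simpa [List.isEmpty_iff] using hc
          rw [if_neg hce, ih [] (cur.reverse :: acc)]
          have hcr : cur.reverse ≠ [] := by simpa using hc
          have hstep : pvBStep pvDelims (acc.reverse, cur.reverse) c
              = (acc.reverse ++ [cur.reverse], List.reverse []) := by
            unfold pvBStep
            rw [if_pos hdl, if_pos hcr]
            simp
          rw [hstep]
          simp
      · have hf : (PySem.Chars.isspace c || pvDelims.contains c) = false := by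
          simpa using hdl
        rw [subst_of_not_delim c hf]
        rw [if_neg hdl, ih (c :: cur) acc]
        have h1 : PySem.Chars.isspace c = false := (Bool.or_eq_false_iff.mp hf).1
        have h2 : c ∉ pvDelims := by simpa using (Bool.or_eq_false_iff.mp hf).2
        have hstep : pvBStep pvDelims (acc.reverse, cur.reverse) c
            = (acc.reverse, cur.reverse ++ [c]) := by
          unfold pvBStep
          rw [if_neg (by simp [h1, h2])]
        rw [hstep]
        simp

-- every token split₀ produces is nonempty
theorem split_go_tokens_ne_nil :
    ∀ (l cur : List Char) (acc : List (List Char)),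
      (∀ t ∈ acc, t ≠ []) →
      ∀ t ∈ PySem.Chars.split₀.go l cur acc, t ≠ [] := by
  intro l
  induction l with
  | nil =>
      intro cur acc hacc t ht
      simp only [PySem.Chars.split₀.go] at ht
      by_cases h : cur.isEmpty = true
      · rw [if_pos h] at ht
        exact hacc t (List.mem_reverse.mp ht)
      · rw [if_neg h] at ht
        rcases List.mem_cons.mp (List.mem_reverse.mp ht) with ht | ht
        · subst ht
          simpa [List.isEmpty_iff] using h
        · exact hacc t ht
  | cons c rest ih =>
      intro cur acc hacc t ht
      simp only [PySem.Chars.split₀.go] at ht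
      by_cases hs : PySem.Chars.isspace c = true
      · rw [if_pos hs] at ht
        by_cases hc : cur.isEmpty = true
        · rw [if_pos hc] at ht
          exact ih [] acc hacc t ht
        · rw [if_neg hc] at ht
          refine ih [] (cur.reverse :: acc) ?_ t ht
          intro u hu
          rcases List.mem_cons.mp hu with h | h
          · subst h; simpa [List.isEmpty_iff] using hc
          · exact hacc u h
      · rw [if_neg hs] at ht
        exact ih (c :: cur) acc hacc t ht

theorem split₀_tokens_ne_nil (l : List Char) :
    ∀ t ∈ PySem.Chars.split₀ l, t ≠ [] :=
  split_go_tokens_ne_nil l [] [] (by simp)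

-- ===== VERDICT (by name: the statement is the Claim_ definition above) =====
theorem sanitize_fts_query_py_spec : Claim_equal_sanitize_fts_query_py := by
  intro query _
  unfold Spec_sanitize_fts_query_py sanitize_fts_query_py sanitize_fts_query_py_alt
  dsimp only
  rw [show (['"', '\'', '(', ')', '*', '^', '+', '-'] : List Char) = pvDelims from rfl]
  rw [replace_chain_eq_map]
  have hsplit : PySem.Chars.split₀ (query.toList.map pvSubst)
      = pvFinish (query.toList.foldl (pvBStep pvDelims) ([], [])) := by
    simpa [PySem.Chars.split₀] using split_go_eq_fold query.toList [] []
  have hfilter :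
      (pvFinish (query.toList.foldl (pvBStep pvDelims) ([], []))).filter (fun t => !t.isEmpty)
      = pvFinish (query.toList.foldl (pvBStep pvDelims) ([], [])) := by
    apply List.filter_eq_self.mpr
    intro t ht
    have := split₀_tokens_ne_nil (query.toList.map pvSubst) t (by rw [hsplit]; exact ht)
    simpa [List.isEmpty_iff] using this
  rw [hsplit, hfilter]
  rfl
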